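-- pv_equiv track=rewrite | github.com/woobottle/TIL | Algorithm/Baekjoon/python/1407.py | calc
-- ===== SOURCE A (Python) =====
-- def calc(number) :
--   i = 1
--   count = 0
--   x = number
--   while x > 0 :
--     if x % 2 != 0 :
--       y = x // 2 + 1
--     else :
--       y = x // 2
--     count += y * i
--     i *= 2
--     x -= y
--
--   return count
-- ===== SOURCE B (Python) =====
-- def calc(number):
--     if number <= 0:
--         return 0
--     y = number // 2 + 1 if number % 2 != 0 else number // 2
--     return y + 2 * calc(number - y)
-- ===== Notes on version B (the rewrite author's own statement) =====
-- stated objective: simpler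
-- what changed: Replaces the accumulator loop over (i, count, x) with a direct recursion: return the ceiling-half plus double the recursive call on the remainder, eliminating the running weight i and the count accumulator.
import Mathlib
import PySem

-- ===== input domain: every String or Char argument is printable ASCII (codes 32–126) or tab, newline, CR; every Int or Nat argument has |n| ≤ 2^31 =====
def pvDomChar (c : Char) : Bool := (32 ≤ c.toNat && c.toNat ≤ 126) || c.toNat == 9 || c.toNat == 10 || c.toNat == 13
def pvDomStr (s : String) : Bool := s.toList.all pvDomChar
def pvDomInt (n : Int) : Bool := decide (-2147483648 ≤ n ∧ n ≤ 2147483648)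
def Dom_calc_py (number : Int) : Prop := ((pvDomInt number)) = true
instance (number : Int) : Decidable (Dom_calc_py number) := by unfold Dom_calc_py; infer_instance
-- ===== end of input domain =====

-- B replaces A's accumulator loop with the direct recursion calc(n) = ceil(n/2) + 2*calc(n - ceil(n/2)); same values, simpler.

-- step decrease used by both ports' termination
theorem pv_step_lt (x : Int) (hx : 0 < x) :
    (x - (if PySem.Int.mod x 2 ≠ 0 then PySem.Int.floordiv x 2 + 1 else PySem.Int.floordiv x 2)).toNat < x.toNat := by
  have h2 : (0:Int) < 2 := by norm_num
  rw [PySem.Int.mod_eq_emod_of_pos h2, PySem.Int.floordiv_eq_ediv_of_pos h2]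
  split <;> omega

-- ===== PORT A =====
-- while-loop of A as structural recursion on the loop state (i, count, x)
def calcLoop (i count x : Int) : Int :=
  if 0 < x then
    let y := if PySem.Int.mod x 2 ≠ 0 then PySem.Int.floordiv x 2 + 1 else PySem.Int.floordiv x 2
    calcLoop (i * 2) (count + y * i) (x - y)
  else count
termination_by x.toNat
decreasing_by exact pv_step_lt x (by omega)

def calc_py (number : Int) : Int := calcLoop 1 0 number

-- ===== PORT B =====
def calc_py_alt (number : Int) : Int :=
  if h : number ≤ 0 then 0
  else
    let y := if PySem.Int.mod number 2 ≠ 0 then PySem.Int.floordiv number 2 + 1 else PySem.Int.floordiv number 2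
    y + 2 * calc_py_alt (number - y)
termination_by number.toNat
decreasing_by exact pv_step_lt number (by omega)

-- ===== PRECONDITION & SPEC =====
def Spec_calc_py (number : Int) (out : Int) : Prop := out = calc_py_alt number
instance (number : Int) (out : Int) : Decidable (Spec_calc_py number out) := by unfold Spec_calc_py; infer_instance

-- ===== CLAIM (what is proved, stated in full; the proofs are below) =====
def Claim_equal_calc_py : Prop := ∀ (number : Int), Dom_calc_py number → Spec_calc_py number (calc_py number)

-- ===== LEMMAS AND PROOFS =====
theorem calcLoop_eq (n : Nat) : ∀ (x i count : Int), x.toNat = n →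
    calcLoop i count x = count + i * calc_py_alt x := by
  induction n using Nat.strong_induction_on with
  | _ n ih =>
    intro x i count hn
    rw [calcLoop, calc_py_alt]
    by_cases hx : 0 < x
    · have hle : ¬ x ≤ 0 := by omega
      simp only [hx, hle, dif_pos, dif_neg, not_false_iff]
      rw [ih _ (hn ▸ pv_step_lt x hx) _ _ _ rfl]
      simp only [if_true]
      ring
    · have hle : x ≤ 0 := by omega
      simp only [hx, hle, dif_neg, dif_pos, not_false_iff, if_false]
      ring

-- ===== VERDICT (by name: the statement is the Claim_ definition above) =====
theorem calc_py_spec : Claim_equal_calc_py := by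
  intro number _
  unfold Spec_calc_py calc_py
  rw [calcLoop_eq number.toNat number 1 0 rfl]
  ring
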